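-- pv_equiv track=rewrite | github.com/rogerlew/wepppy | tools/code_quality_observability.py | highest_severity
-- ===== SOURCE A (Python) =====
-- SEVERITY_ORDER = {"green": 0, "yellow": 1, "red": 2, "unknown": -1, "n/a": -1}
--
-- def highest_severity(values: list[str]) -> str:
--     best = "unknown"
--     best_score = -1
--     for value in values:
--         score = SEVERITY_ORDER.get(value, -1)
--         if score > best_score:
--             best = value
--             best_score = score
--     return best
-- ===== SOURCE B (Python) =====
-- def highest_severity(values):
--     if "red" in values:
--         return "red"
--     if "yellow" in values:
--         return "yellow"
--     if "green" in values:
--         return "green"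
--     return "unknown"
-- ===== Notes on version B (the rewrite author's own statement) =====
-- stated objective: idiomatic
-- what changed: Replaced the score-accumulator loop over a severity-ranking dict with three short-circuiting membership probes in descending priority ('red', 'yellow', 'green'), returning 'unknown' otherwise.
import Mathlib
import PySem

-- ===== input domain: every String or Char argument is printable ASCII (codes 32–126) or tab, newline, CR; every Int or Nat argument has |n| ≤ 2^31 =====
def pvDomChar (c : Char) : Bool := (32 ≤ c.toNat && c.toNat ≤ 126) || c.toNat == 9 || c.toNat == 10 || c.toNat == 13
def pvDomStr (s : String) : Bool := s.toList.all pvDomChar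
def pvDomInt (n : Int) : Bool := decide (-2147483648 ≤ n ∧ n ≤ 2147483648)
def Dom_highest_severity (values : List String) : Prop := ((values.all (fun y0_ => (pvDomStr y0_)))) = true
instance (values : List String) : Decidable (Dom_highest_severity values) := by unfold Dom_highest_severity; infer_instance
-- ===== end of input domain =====

-- B replaces A's score-accumulator loop over a severity-ranking dict with three
-- short-circuiting membership probes in descending priority; same cost, more idiomatic.


-- ===== PORT A =====
def SEVERITY_ORDER : PySem.Dict String Int :=
  PySem.Dict.ofList [("green", 0), ("yellow", 1), ("red", 2), ("unknown", -1), ("n/a", -1)]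

-- loop body of A: score = SEVERITY_ORDER.get(value, -1); if score > best_score: best, best_score = value, score
def hsStep (acc : String × Int) (value : String) : String × Int :=
  let score := PySem.Dict.getD SEVERITY_ORDER value (-1)
  if score > acc.2 then (value, score) else acc

def highest_severity (values : List String) : String :=
  (values.foldl hsStep ("unknown", -1)).1

-- ===== PORT B =====
def highest_severity_alt (values : List String) : String :=
  if "red" ∈ values then "red"
  else if "yellow" ∈ values then "yellow"
  else if "green" ∈ values then "green"
  else "unknown"

-- ===== PRECONDITION & SPEC =====
def Spec_highest_severity (values : List String) (out : String) : Prop := out = highest_severity_alt values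
instance (values : List String) (out : String) : Decidable (Spec_highest_severity values out) := by unfold Spec_highest_severity; infer_instance

-- ===== CLAIM (what is proved, stated in full; the proofs are below) =====
def Claim_equal_highest_severity : Prop := ∀ (values : List String), Dom_highest_severity values → Spec_highest_severity values (highest_severity values)

-- ===== LEMMAS AND PROOFS =====
theorem hsStep_key (b : String) (s : Int) (v : String) (r : Int)
    (hk : PySem.Dict.getD SEVERITY_ORDER v (-1) = r) :
    hsStep (b, s) v = if s < r then (v, r) else (b, s) := by
  simp [hsStep, hk]

theorem getD_other (v : String) (hr : v ≠ "red") (hy : v ≠ "yellow") (hg : v ≠ "green")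
    (hu : v ≠ "unknown") (hn : v ≠ "n/a") :
    PySem.Dict.getD SEVERITY_ORDER v (-1) = -1 := by
  have hitems : SEVERITY_ORDER.items =
      [("green", 0), ("yellow", 1), ("red", 2), ("unknown", -1), ("n/a", -1)] := by decide
  have eg : (("green":String) == v) = false := by simp; exact fun h => hg h.symm
  have ey : (("yellow":String) == v) = false := by simp; exact fun h => hy h.symm
  have er : (("red":String) == v) = false := by simp; exact fun h => hr h.symm
  have eu : (("unknown":String) == v) = false := by simp; exact fun h => hu h.symm
  have en : (("n/a":String) == v) = false := by simp; exact fun h => hn h.symm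
  simp [PySem.Dict.getD, PySem.Dict.get?, hitems, List.find?, eg, ey, er, eu, en]

theorem hs_loop_char (values : List String) (b : String) (s : Int) (hs : -1 ≤ s) :
    (values.foldl hsStep (b, s)).1 =
    if s < 2 ∧ "red" ∈ values then "red"
    else if s < 1 ∧ "yellow" ∈ values then "yellow"
    else if s < 0 ∧ "green" ∈ values then "green"
    else b := by
  induction values generalizing b s with
  | nil => simp
  | cons v vs ih =>
    rw [List.foldl_cons]
    by_cases hr : v = "red"
    · subst hr
      rw [hsStep_key b s "red" 2 (by decide)]
      by_cases h2 : s < 2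
      · rw [if_pos h2, ih "red" 2 (by omega)]
        simp [h2]
      · rw [if_neg h2, ih b s hs]
        simp only [List.mem_cons]
        split_ifs <;> first | rfl | omega
    · by_cases hy : v = "yellow"
      · subst hy
        rw [hsStep_key b s "yellow" 1 (by decide)]
        by_cases h1 : s < 1
        · rw [if_pos h1, ih "yellow" 1 (by omega)]
          by_cases hm : "red" ∈ vs <;> simp [hm, h1, (by omega : s < 2)]
        · rw [if_neg h1, ih b s hs]
          simp only [List.mem_cons]
          split_ifs <;> first | rfl | omega | tauto
      · by_cases hg : v = "green"
        · subst hg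
          rw [hsStep_key b s "green" 0 (by decide)]
          by_cases h0 : s < 0
          · rw [if_pos h0, ih "green" 0 (by omega)]
            by_cases hm : "red" ∈ vs <;> by_cases hm2 : "yellow" ∈ vs <;>
              simp [hm, hm2, h0, (by omega : s < 2), (by omega : s < 1)]
          · rw [if_neg h0, ih b s hs]
            simp only [List.mem_cons]
            split_ifs <;> first | rfl | omega | tauto
        · by_cases hu : v = "unknown"
          · subst hu
            rw [hsStep_key b s "unknown" (-1) (by decide), if_neg (by omega), ih b s hs]
            simp only [List.mem_cons]
            split_ifs <;> first | rfl | omega | tauto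
          · by_cases hn : v = "n/a"
            · subst hn
              rw [hsStep_key b s "n/a" (-1) (by decide), if_neg (by omega), ih b s hs]
              simp only [List.mem_cons]
              split_ifs <;> first | rfl | omega | tauto
            · rw [hsStep_key b s v (-1) (getD_other v hr hy hg hu hn), if_neg (by omega), ih b s hs]
              simp only [List.mem_cons]
              have nr : ¬ (("red":String) = v) := fun h => hr h.symm
              have ny : ¬ (("yellow":String) = v) := fun h => hy h.symm
              have ng : ¬ (("green":String) = v) := fun h => hg h.symm
              simp only [eq_false nr, eq_false ny, eq_false ng, false_or]

-- ===== VERDICT (by name: the statement is the Claim_ definition above) =====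
theorem highest_severity_spec : Claim_equal_highest_severity := by
  intro values _
  unfold Spec_highest_severity highest_severity highest_severity_alt
  rw [hs_loop_char values "unknown" (-1) (by omega)]
  simp
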